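-- pv_equiv track=rewrite | github.com/billzorn/msp-pymodel | lib/utils.py | diff_memory
-- ===== SOURCE A (Python) =====
-- def regions_equal(mems):
--     for i in range(0, len(mems)):
--         for j in range(i+1, len(mems)):
--             if mems[i] != mems[j]:
--                 return False
--     return True
--
-- def diff_memory(mems, addr, align = 8):
--     longest = max(map(len, mems))
--
--     chunks = {}
--     prev_addr = addr
--     prev_regions = []
--
--     for idx in range(0, longest, align):
--         regions = [mem[idx:idx+align] for mem in mems]
--         if regions_equal(regions):
--             if len(prev_regions) > 0:
--                 merged_regions = prev_regions[0][:]
--                 for i in range(1, len(prev_regions)):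
--                     for mem_idx in range(len(merged_regions)):
--                         merged_regions[mem_idx] += prev_regions[i][mem_idx]
--                 chunks[prev_addr] = merged_regions
--                 prev_regions = []
--             prev_addr = addr + idx + align
--         else:
--             prev_regions.append(regions)
--
--     if len(prev_regions) > 0:
--         merged_regions = prev_regions[0][:]
--         for i in range(1, len(prev_regions)):
--             for mem_idx in range(len(merged_regions)):
--                 merged_regions[mem_idx] += prev_regions[i][mem_idx]
--         chunks[prev_addr] = merged_regions
--
--     return chunks
-- ===== SOURCE B (Python) =====
-- def diff_memory(mems, addr, align=8):
--     longest = max(map(len, mems))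
--     first = mems[0]
--     chunks = {}
--     start = None
--     for idx in range(0, longest, align):
--         s = first[idx:idx+align]
--         if all(mem[idx:idx+align] == s for mem in mems):
--             if start is not None:
--                 chunks[addr + start] = [mem[start:idx] for mem in mems]
--                 start = None
--         else:
--             if start is None:
--                 start = idx
--     if start is not None:
--         chunks[addr + start] = [mem[start:] for mem in mems]
--     return chunks
-- ===== Notes on version B (the rewrite author's own statement) =====
-- stated objective: alternative
-- what changed: B replaces A's pairwise all-pairs region comparison per block by a single comparison of each region against the first (transitivity of equality), and replaces A's deferred list-of-chunks element-wise merge loop by tracking only the start index of the current differing run and emitting one direct slice mem[start:end] per memory.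
import Mathlib
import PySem

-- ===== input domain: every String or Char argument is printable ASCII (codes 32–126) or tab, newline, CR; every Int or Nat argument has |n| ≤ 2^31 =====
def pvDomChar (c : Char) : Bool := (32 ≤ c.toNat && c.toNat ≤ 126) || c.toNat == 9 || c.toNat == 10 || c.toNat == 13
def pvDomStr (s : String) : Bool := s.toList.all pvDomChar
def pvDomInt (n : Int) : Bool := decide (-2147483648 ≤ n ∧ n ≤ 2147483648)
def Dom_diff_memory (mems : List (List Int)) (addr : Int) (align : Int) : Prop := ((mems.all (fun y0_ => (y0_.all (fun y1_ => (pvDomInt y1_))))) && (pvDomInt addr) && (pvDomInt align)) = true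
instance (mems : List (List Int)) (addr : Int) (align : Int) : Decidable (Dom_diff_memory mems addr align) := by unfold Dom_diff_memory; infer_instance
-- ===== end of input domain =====

-- B compares each region to the first instead of all pairs and, per differing run, emits one
-- direct slice per memory instead of element-wise chunk concatenation: a different algorithm, same values.


-- ===== PORT A =====
-- helper regions_equal: nested index loops with early return = nested .all
def regions_equal (mems : List (List Int)) : Bool :=
  (PySem.List.pyRange 0 (mems.length : Int) 1).all (fun i =>
    (PySem.List.pyRange (i + 1) (mems.length : Int) 1).all (fun j =>
      PySem.List.pyGetD mems i [] == PySem.List.pyGetD mems j []))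

-- A's merge block: merged = prev[0][:]; for i in range(1,len(prev)): for mem_idx in range(len(merged)): merged[mem_idx] += prev[i][mem_idx]
-- (indices produced by range are nonnegative and in range, so list assignment is `set` at `.toNat`)
def merge_regions (prev : List (List (List Int))) : List (List Int) :=
  (PySem.List.pyRange 1 (prev.length : Int) 1).foldl
    (fun merged i =>
      (PySem.List.pyRange 0 (merged.length : Int) 1).foldl
        (fun m mem_idx =>
          m.set mem_idx.toNat
            (PySem.List.pyGetD m mem_idx [] ++ PySem.List.pyGetD (PySem.List.pyGetD prev i []) mem_idx []))
        merged)
    (PySem.List.pyGetD prev 0 [])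

def diff_memory (mems : List (List Int)) (addr : Int) (align : Int) : List (Int × List (List Int)) :=
  -- longest = max(map(len, mems)); max raises on an empty sequence — Pre_ requires mems ≠ [], the default is unreachable
  let longest : Int := (PySem.List.max? (mems.map (fun m => (m.length : Int))) (fun x => x)).getD 0
  let st :=
    (PySem.List.pyRange 0 longest align).foldl
      (fun (s : PySem.Dict Int (List (List Int)) × Int × List (List (List Int))) idx =>
        let chunks := s.1; let prev_addr := s.2.1; let prev_regions := s.2.2
        let regions := mems.map (fun mem => PySem.List.slice mem (some idx) (some (idx + align)))
        if regions_equal regions then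
          if prev_regions.length > 0 then
            (chunks.insert prev_addr (merge_regions prev_regions), addr + idx + align, [])
          else
            (chunks, addr + idx + align, prev_regions)
        else
          (chunks, prev_addr, prev_regions ++ [regions]))
      (PySem.Dict.empty, addr, [])
  (if st.2.2.length > 0 then st.1.insert st.2.1 (merge_regions st.2.2) else st.1).items

-- ===== PORT B =====
def diff_memory_alt (mems : List (List Int)) (addr : Int) (align : Int) : List (Int × List (List Int)) :=
  let longest : Int := (PySem.List.max? (mems.map (fun m => (m.length : Int))) (fun x => x)).getD 0
  let first := PySem.List.pyGetD mems 0 []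
  let st :=
    (PySem.List.pyRange 0 longest align).foldl
      (fun (s : PySem.Dict Int (List (List Int)) × Option Int) idx =>
        let chunks := s.1; let start := s.2
        let sl := PySem.List.slice first (some idx) (some (idx + align))
        if mems.all (fun mem => PySem.List.slice mem (some idx) (some (idx + align)) == sl) then
          match start with
          | some b => (chunks.insert (addr + b) (mems.map (fun mem => PySem.List.slice mem (some b) (some idx))), none)
          | none => (chunks, none)
        else
          match start with
          | some b => (chunks, some b)
          | none => (chunks, some idx))
      (PySem.Dict.empty, none)
  (match st.2 with
   | some b => st.1.insert (addr + b) (mems.map (fun mem => PySem.List.slice mem (some b) none))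
   | none => st.1).items

-- ===== PRECONDITION & SPEC =====
-- Pre_ excludes exactly the inputs where A raises: mems = [] (max() of an empty sequence, ValueError)
-- and align = 0 (range() with zero step, ValueError).
def Pre_diff_memory (mems : List (List Int)) (addr : Int) (align : Int) : Prop :=
  mems ≠ [] ∧ align ≠ 0
instance (mems : List (List Int)) (addr : Int) (align : Int) : Decidable (Pre_diff_memory mems addr align) := by unfold Pre_diff_memory; infer_instance

def pvWitness_diff_memory : List (List Int) × Int × Int := ([[1, 2, 3, 4], [1, 2, 0, 4]], 100, 2)

def Spec_diff_memory (mems : List (List Int)) (addr : Int) (align : Int) (out : List (Int × List (List Int))) : Prop := out = diff_memory_alt mems addr align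
instance (mems : List (List Int)) (addr : Int) (align : Int) (out : List (Int × List (List Int))) : Decidable (Spec_diff_memory mems addr align out) := by unfold Spec_diff_memory; infer_instance

-- ===== CLAIM (what is proved, stated in full; the proofs are below) =====
def Claim_equal_diff_memory : Prop := ∀ (mems : List (List Int)) (addr : Int) (align : Int), Dom_diff_memory mems addr align → Pre_diff_memory mems addr align → Spec_diff_memory mems addr align (diff_memory mems addr align)

-- ===== LEMMAS AND PROOFS =====

-- the step function of A's main loop (definitionally the lambda inside diff_memory)
def pvStepA (mems : List (List Int)) (addr align : Int) :
    PySem.Dict Int (List (List Int)) × Int × List (List (List Int)) → Int →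
    PySem.Dict Int (List (List Int)) × Int × List (List (List Int)) :=
  fun s idx =>
    let regions := mems.map (fun mem => PySem.List.slice mem (some idx) (some (idx + align)))
    if regions_equal regions then
      if s.2.2.length > 0 then
        (s.1.insert s.2.1 (merge_regions s.2.2), addr + idx + align, [])
      else (s.1, addr + idx + align, s.2.2)
    else (s.1, s.2.1, s.2.2 ++ [regions])

-- the step function of B's main loop (definitionally the lambda inside diff_memory_alt)
def pvStepB (mems : List (List Int)) (addr align : Int) :
    PySem.Dict Int (List (List Int)) × Option Int → Int →
    PySem.Dict Int (List (List Int)) × Option Int :=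
  fun s idx =>
    let sl := PySem.List.slice (PySem.List.pyGetD mems 0 []) (some idx) (some (idx + align))
    if mems.all (fun mem => PySem.List.slice mem (some idx) (some (idx + align)) == sl) then
      match s.2 with
      | some b => (s.1.insert (addr + b)
          (mems.map (fun mem => PySem.List.slice mem (some b) (some idx))), none)
      | none => (s.1, none)
    else
      match s.2 with
      | some b => (s.1, some b)
      | none => (s.1, some idx)

-- the block indices processed after n loop iterations
def pvL (al n : Nat) : List Int := (List.range n).map (fun k => ((al * k : Nat) : Int))

def pvA (mems : List (List Int)) (addr align : Int) (al n : Nat) :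
    PySem.Dict Int (List (List Int)) × Int × List (List (List Int)) :=
  (pvL al n).foldl (pvStepA mems addr align) (PySem.Dict.empty, addr, [])

def pvB (mems : List (List Int)) (addr align : Int) (al n : Nat) :
    PySem.Dict Int (List (List Int)) × Option Int :=
  (pvL al n).foldl (pvStepB mems addr align) (PySem.Dict.empty, none)

lemma pv_pyGetD_nat {α : Type} (xs : List α) (k : Nat) (d : α) (hk : k < xs.length) :
    PySem.List.pyGetD xs (k : Int) d = xs[k] := by
  rw [PySem.List.pyGetD_eq_getElem xs d (by positivity) (by exact_mod_cast hk)]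
  simp

lemma pv_pyGetD_zero_cons {α : Type} (a : α) (t : List α) (d : α) :
    PySem.List.pyGetD (a :: t) 0 d = a :=
  pv_pyGetD_nat (a :: t) 0 d (Nat.succ_pos _)

-- regions_equal (nested pairwise loop) tests exactly "every element equals the first"
lemma pv_regions_equal_iff (l : List (List Int)) :
    regions_equal l = l.all (fun x => x == PySem.List.pyGetD l 0 []) := by
  cases l with
  | nil => simp [regions_equal, PySem.List.pyRange_one_eq_nil le_rfl]
  | cons h0 t =>
    rw [Bool.eq_iff_iff]
    unfold regions_equal
    simp only [List.all_eq_true, PySem.List.mem_pyRange_one, and_imp, beq_iff_eq]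
    constructor
    · intro H x hx
      obtain ⟨k, hk, rfl⟩ := List.mem_iff_getElem.mp hx
      have hg0 : PySem.List.pyGetD (h0 :: t) 0 [] = h0 := pv_pyGetD_zero_cons h0 t []
      rcases Nat.eq_zero_or_pos k with hk0 | hk0
      · subst hk0; simp [hg0]
      · have hlen : (0 : Int) < ((h0 :: t).length : Int) := by
          exact_mod_cast List.length_pos_iff.mpr (List.cons_ne_nil h0 t)
        have h2 := H 0 le_rfl hlen (k : Int) (by omega) (by exact_mod_cast hk)
        rw [hg0, pv_pyGetD_nat _ k _ hk] at h2
        rw [hg0]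
        exact h2.symm
    · intro H i h0i hilen j hij hjlen
      lift i to ℕ using h0i with ki
      lift j to ℕ using (by omega : (0 : Int) ≤ j) with kj
      rw [pv_pyGetD_nat _ ki _ (by exact_mod_cast hilen),
        pv_pyGetD_nat _ kj _ (by exact_mod_cast hjlen)]
      rw [H _ (List.getElem_mem (by exact_mod_cast hilen)),
        H _ (List.getElem_mem (by exact_mod_cast hjlen))]

lemma pv_getElem_idx {α : Type} (l : List α) {i j : Nat}
    (hi : i < l.length) (hj : j < l.length) (hij : i = j) : l[i] = l[j] := by
  subst hij; rfl

-- the merge inner loop (set each slot to slot ++ r[slot]) is zipWith (++)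
lemma pv_inner_fold (m r : List (List Int)) (hr : m.length = r.length) :
    (PySem.List.pyRange 0 (m.length : Int) 1).foldl
      (fun acc k => acc.set k.toNat
        (PySem.List.pyGetD acc k [] ++ PySem.List.pyGetD r k [])) m
      = List.zipWith (· ++ ·) m r := by
  have aux : ∀ n : Nat, n ≤ m.length →
      (PySem.List.pyRange 0 (n : Int) 1).foldl
        (fun acc k => acc.set k.toNat
          (PySem.List.pyGetD acc k [] ++ PySem.List.pyGetD r k [])) m
      = (List.zipWith (· ++ ·) m r).take n ++ m.drop n := by
    intro n
    induction n with
    | zero => intro _; simp [PySem.List.pyRange_one_eq_nil le_rfl]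
    | succ n ih =>
      intro hn
      have hn' : n ≤ m.length := Nat.le_of_succ_le hn
      have hnm : n < m.length := hn
      have hsplit : PySem.List.pyRange 0 ((n + 1 : Nat) : Int) 1
          = PySem.List.pyRange 0 (n : Int) 1 ++ [(n : Int)] := by
        push_cast
        exact PySem.List.pyRange_one_succ_right (by positivity)
      rw [hsplit, List.foldl_append, ih hn']
      simp only [List.foldl_cons, List.foldl_nil]
      set z := List.zipWith (· ++ ·) m r with hz
      have hzlen : z.length = m.length := by simp [hz]; omega
      have htlen : (z.take n).length = n := by simp; omega
      have hslen : (z.take n ++ m.drop n).length = m.length := by simp; omega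
      have hsg : PySem.List.pyGetD (z.take n ++ m.drop n) (n : Int) [] = m[n] := by
        rw [pv_pyGetD_nat _ n _ (by omega)]
        rw [List.getElem_append_right (by omega)]
        simp [htlen]
      have hrg : PySem.List.pyGetD r (n : Int) [] = r[n] := pv_pyGetD_nat _ n _ (by omega)
      rw [hsg, hrg]
      refine List.ext_getElem (by simp [List.length_set, hzlen]; omega) ?_
      intro i hi1 hi2
      have hzn : z[n] = m[n] ++ r[n] := List.getElem_zipWith
      simp only [Int.toNat_natCast] at hi1 ⊢
      by_cases hin : i = n
      · subst hin
        rw [List.getElem_set, if_pos rfl]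
        rw [List.getElem_append, dif_pos (by simp [hzlen]; omega)]
        rw [List.getElem_take]
        exact hzn.symm
      · rw [List.getElem_set, if_neg (by omega)]
        rw [List.getElem_append, List.getElem_append]
        by_cases hilt : i < n
        · rw [dif_pos (by simp [hzlen]; omega), dif_pos (by simp [hzlen]; omega)]
          rw [List.getElem_take, List.getElem_take]
        · rw [dif_neg (by simp [hzlen]; omega), dif_neg (by simp [hzlen]; omega)]
          simp only [List.length_take, List.getElem_drop, hzlen,
            Nat.min_eq_left hn', Nat.min_eq_left hn]
          exact pv_getElem_idx m (by simp [hzlen] at hi1; omega)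
            (by simp [hzlen] at hi1; omega) (by simp [hzlen] at hi1; omega)
  rw [aux m.length le_rfl]
  have : (List.zipWith (· ++ ·) m r).length ≤ m.length := by simp
  simp [List.take_of_length_le this]

lemma pv_merge_length (K : Nat) (prev : List (List (List Int)))
    (h : ∀ x ∈ prev, x.length = K) (hne : prev ≠ []) :
    (merge_regions prev).length = K := by
  unfold merge_regions
  have h0 : PySem.List.pyGetD prev 0 [] ∈ prev := by
    cases prev with
    | nil => exact absurd rfl hne
    | cons a t => rw [pv_pyGetD_zero_cons]; exact List.mem_cons_self
  refine List.foldlRecOn (motive := fun (x : List (List Int)) => x.length = K) _ _ (h _ h0) ?_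
  intro acc hacc i hi
  rw [PySem.List.mem_pyRange_one] at hi
  have hiN : PySem.List.pyGetD prev i [] ∈ prev := by
    lift i to ℕ using (by omega) with k
    rw [pv_pyGetD_nat _ k _ (by exact_mod_cast hi.2)]
    exact List.getElem_mem _
  rw [pv_inner_fold acc _ (by rw [hacc, h _ hiN])]
  simp [hacc, h _ hiN]

lemma pv_merge_singleton (r : List (List Int)) : merge_regions [r] = r := by
  unfold merge_regions
  simp [PySem.List.pyRange_one_eq_nil le_rfl]

lemma pv_merge_append (K : Nat) (prev : List (List (List Int))) (r : List (List Int))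
    (h : ∀ x ∈ prev, x.length = K) (hrK : r.length = K) (hne : prev ≠ []) :
    merge_regions (prev ++ [r]) = List.zipWith (· ++ ·) (merge_regions prev) r := by
  have hlp : 1 ≤ (prev.length : Int) := by
    have := List.length_pos_iff.mpr hne
    exact_mod_cast this
  have hrr : PySem.List.pyGetD (prev ++ [r]) (prev.length : Int) [] = r := by
    rw [pv_pyGetD_nat _ prev.length _ (by simp)]
    simp
  conv_lhs => unfold merge_regions
  have hlen : (((prev ++ [r]).length : Nat) : Int) = (prev.length : Int) + 1 := by
    simp
  rw [hlen, PySem.List.pyRange_one_succ_right hlp, List.foldl_append]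
  simp only [List.foldl_cons, List.foldl_nil]
  have hinit : PySem.List.pyGetD (prev ++ [r]) 0 [] = PySem.List.pyGetD prev 0 [] := by
    cases prev with
    | nil => exact absurd rfl hne
    | cons a t => rw [List.cons_append, pv_pyGetD_zero_cons, pv_pyGetD_zero_cons]
  rw [hinit]
  have hcong : (PySem.List.pyRange 1 (prev.length : Int) 1).foldl
      (fun merged i => (PySem.List.pyRange 0 ((merged.length : Nat) : Int) 1).foldl
        (fun m mem_idx => m.set mem_idx.toNat
          (PySem.List.pyGetD m mem_idx []
            ++ PySem.List.pyGetD (PySem.List.pyGetD (prev ++ [r]) i []) mem_idx []))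
        merged)
      (PySem.List.pyGetD prev 0 [])
      = merge_regions prev := by
    unfold merge_regions
    apply PySem.List.foldl_congr_mem
    intro acc i hi
    rw [PySem.List.mem_pyRange_one] at hi
    have : PySem.List.pyGetD (prev ++ [r]) i [] = PySem.List.pyGetD prev i [] := by
      lift i to ℕ using (by omega) with k
      have hk : k < prev.length := by exact_mod_cast hi.2
      rw [pv_pyGetD_nat _ k _ (by simp; omega), pv_pyGetD_nat _ k _ hk]
      exact List.getElem_append_left hk
    rw [this]
  rw [hcong]
  show (PySem.List.pyRange 0 (((merge_regions prev).length : Nat) : Int) 1).foldl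
      (fun m mem_idx => m.set mem_idx.toNat
        (PySem.List.pyGetD m mem_idx []
          ++ PySem.List.pyGetD (PySem.List.pyGetD (prev ++ [r]) (prev.length : Int) []) mem_idx []))
      (merge_regions prev) = _
  rw [hrr]
  exact pv_inner_fold _ _ (by rw [pv_merge_length K prev h hne, hrK])

lemma pv_slice_concat (mem : List Int) (s a k : Nat) (hsa : s ≤ a) :
    PySem.List.slice mem (some (s : Int)) (some (a : Int))
      ++ PySem.List.slice mem (some (a : Int)) (some ((a : Int) + (k : Int)))
      = PySem.List.slice mem (some (s : Int)) (some ((a + k : Nat) : Int)) := by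
  rw [show ((a : Int) + (k : Int)) = ((a + k : Nat) : Int) by push_cast; ring]
  rw [PySem.List.slice_natCast, PySem.List.slice_natCast, PySem.List.slice_natCast]
  rw [show a + k - s = (a - s) + k by omega, show a + k - a = k by omega]
  rw [List.take_add]
  congr 1
  rw [List.drop_drop]
  congr 2
  omega

lemma pv_slice_to_end (mem : List Int) (s b : Nat) (h : mem.length ≤ b) :
    PySem.List.slice mem (some (s : Int)) (some (b : Int))
      = PySem.List.slice mem (some (s : Int)) none := by
  rw [PySem.List.slice_natCast, PySem.List.slice_from_natCast]
  apply List.take_of_length_le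
  simp
  omega

lemma pv_zip_map (f g : List Int → List Int) (l : List (List Int)) :
    List.zipWith (· ++ ·) (l.map f) (l.map g) = l.map (fun x => f x ++ g x) := by
  induction l with
  | nil => rfl
  | cons a t ih => simp [ih]

-- the main loop invariant: chunks agree; B's start marks the beginning of the current
-- differing run, whose accumulated merge is one contiguous slice per memory
lemma pv_main (mems : List (List Int)) (addr align : Int) (al : Nat)
    (hal : align = (al : Int)) (hal0 : 0 < al) (hne : mems ≠ []) (n : Nat) :
    (pvA mems addr align al n).1 = (pvB mems addr align al n).1 ∧
    (((pvB mems addr align al n).2 = none ∧ (pvA mems addr align al n).2.2 = [] ∧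
        (pvA mems addr align al n).2.1 = addr + ((al * n : Nat) : Int)) ∨
      (∃ j : Nat, j < n ∧ (pvB mems addr align al n).2 = some ((al * j : Nat) : Int) ∧
        (pvA mems addr align al n).2.1 = addr + ((al * j : Nat) : Int) ∧
        (pvA mems addr align al n).2.2 ≠ [] ∧
        (∀ x ∈ (pvA mems addr align al n).2.2, x.length = mems.length) ∧
        merge_regions (pvA mems addr align al n).2.2
          = mems.map (fun mem => PySem.List.slice mem (some ((al * j : Nat) : Int))
              (some ((al * n : Nat) : Int))))) := by
  induction n with
  | zero =>
    refine ⟨rfl, Or.inl ⟨rfl, rfl, ?_⟩⟩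
    simp [pvA, pvL]
  | succ n ih =>
    have hstep : pvL al (n + 1) = pvL al n ++ [((al * n : Nat) : Int)] := by
      simp [pvL, List.range_succ]
    have hA : pvA mems addr align al (n + 1)
        = pvStepA mems addr align (pvA mems addr align al n) ((al * n : Nat) : Int) := by
      simp only [pvA, hstep, List.foldl_append, List.foldl_cons, List.foldl_nil]
    have hB : pvB mems addr align al (n + 1)
        = pvStepB mems addr align (pvB mems addr align al n) ((al * n : Nat) : Int) := by
      simp only [pvB, hstep, List.foldl_append, List.foldl_cons, List.foldl_nil]
    rw [hA, hB]
    obtain ⟨h1, h2⟩ := ih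
    set sA := pvA mems addr align al n with hsA
    set sB := pvB mems addr align al n with hsB
    set idx := ((al * n : Nat) : Int) with hidx
    have hsucc : idx + align = ((al * (n + 1) : Nat) : Int) := by
      rw [hal, hidx]; push_cast; ring
    have hcond : regions_equal (mems.map (fun mem =>
          PySem.List.slice mem (some idx) (some (idx + align))))
        = mems.all (fun mem => PySem.List.slice mem (some idx) (some (idx + align))
            == PySem.List.slice (PySem.List.pyGetD mems 0 []) (some idx) (some (idx + align))) := by
      rw [pv_regions_equal_iff, List.all_map]
      cases mems with
      | nil => exact absurd rfl hne
      | cons m0 t =>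
        simp only [List.map_cons, pv_pyGetD_zero_cons, Function.comp_def]
    by_cases hc : (mems.all (fun mem =>
        PySem.List.slice mem (some idx) (some (idx + align))
          == PySem.List.slice (PySem.List.pyGetD mems 0 [])
              (some idx) (some (idx + align)))) = true
    · -- all memories agree on this block
      rcases h2 with ⟨hBn, hAp, hApa⟩ | ⟨j, hj, hBs, hApa, hAne, hAlen, hAmerge⟩
      · have hA' : pvStepA mems addr align sA idx
            = (sA.1, addr + idx + align, ([] : List (List (List Int)))) := by
          simp only [pvStepA]
          rw [hcond, hc]
          simp [hAp]
        have hB' : pvStepB mems addr align sB idx = (sB.1, none) := by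
          simp only [pvStepB]
          rw [hc, hBn]
          simp
        refine ⟨by rw [hA', hB']; exact h1, Or.inl ⟨by rw [hB'], by rw [hA'], ?_⟩⟩
        rw [hA']
        show addr + idx + align = addr + ((al * (n + 1) : Nat) : Int)
        rw [← hsucc]; ring
      · have hpos : 0 < sA.2.2.length := List.length_pos_iff.mpr hAne
        have hA' : pvStepA mems addr align sA idx
            = (sA.1.insert sA.2.1 (merge_regions sA.2.2), addr + idx + align,
                ([] : List (List (List Int)))) := by
          simp only [pvStepA]
          rw [hcond, hc]
          simp [hpos]
        have hB' : pvStepB mems addr align sB idx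
            = (sB.1.insert (addr + ((al * j : Nat) : Int)) (mems.map (fun mem =>
                PySem.List.slice mem (some ((al * j : Nat) : Int)) (some idx))), none) := by
          simp only [pvStepB]
          rw [hc, hBs]
          simp
        refine ⟨?_, Or.inl ⟨by rw [hB'], by rw [hA'], ?_⟩⟩
        · rw [hA', hB']
          show sA.1.insert sA.2.1 (merge_regions sA.2.2) = _
          rw [h1, hApa, hAmerge]
        · rw [hA']
          show addr + idx + align = addr + ((al * (n + 1) : Nat) : Int)
          rw [← hsucc]; ring
    · -- this block differs between the memories
      rw [Bool.not_eq_true] at hc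
      have hA' : pvStepA mems addr align sA idx
          = (sA.1, sA.2.1, sA.2.2 ++ [mems.map (fun mem =>
              PySem.List.slice mem (some idx) (some (idx + align)))]) := by
        simp only [pvStepA]
        rw [hcond, hc]
        simp
      rcases h2 with ⟨hBn, hAp, hApa⟩ | ⟨j, hj, hBs, hApa, hAne, hAlen, hAmerge⟩
      · have hB' : pvStepB mems addr align sB idx = (sB.1, some idx) := by
          simp only [pvStepB]
          rw [hc, hBn]
          simp
        refine ⟨?_, Or.inr ⟨n, Nat.lt_succ_self n, ?_, ?_, ?_, ?_, ?_⟩⟩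
        · rw [hA', hB']; exact h1
        · rw [hB']
        · rw [hA']; exact hApa
        · rw [hA']; simp
        · rw [hA', hAp]
          intro x hx
          simp only [List.nil_append, List.mem_singleton] at hx
          subst hx
          simp
        · rw [hA', hAp]
          simp only [List.nil_append]
          rw [pv_merge_singleton]
          rw [← hsucc]
      · have hB' : pvStepB mems addr align sB idx = (sB.1, some ((al * j : Nat) : Int)) := by
          simp only [pvStepB]
          rw [hc, hBs]
          simp
        refine ⟨?_, Or.inr ⟨j, Nat.lt_succ_of_lt hj, ?_, ?_, ?_, ?_, ?_⟩⟩
        · rw [hA', hB']; exact h1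
        · rw [hB']
        · rw [hA']; exact hApa
        · rw [hA']; simp
        · rw [hA']
          intro x hx
          rcases List.mem_append.mp hx with hx | hx
          · exact hAlen x hx
          · simp only [List.mem_singleton] at hx; subst hx; simp
        · rw [hA']
          rw [pv_merge_append mems.length sA.2.2 _ hAlen (by simp) hAne, hAmerge, pv_zip_map]
          apply List.map_congr_left
          intro mem _
          have hsc := pv_slice_concat mem (al * j) (al * n) al
            (Nat.mul_le_mul_left al hj.le)
          rw [show ((al * (n + 1) : Nat) : Int) = ((al * n + al : Nat) : Int) by
            rw [Nat.mul_succ]]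
          rw [hidx, hal]
          exact hsc

-- the two whole programs, phrased via pvStepA / pvStepB (definitionally the ports)
lemma pv_final (mems : List (List Int)) (addr align : Int)
    (hne : mems ≠ []) (halne : align ≠ 0) :
    (let longest : Int := (PySem.List.max? (mems.map (fun m => (m.length : Int))) (fun x => x)).getD 0
     let st := (PySem.List.pyRange 0 longest align).foldl (pvStepA mems addr align)
       ((PySem.Dict.empty : PySem.Dict Int (List (List Int))), addr, ([] : List (List (List Int))))
     (if st.2.2.length > 0 then st.1.insert st.2.1 (merge_regions st.2.2) else st.1).items)
    = (let longest : Int := (PySem.List.max? (mems.map (fun m => (m.length : Int))) (fun x => x)).getD 0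
       let st := (PySem.List.pyRange 0 longest align).foldl (pvStepB mems addr align)
         ((PySem.Dict.empty : PySem.Dict Int (List (List Int))), (none : Option Int))
       (match st.2 with
        | some b => st.1.insert (addr + b) (mems.map (fun mem => PySem.List.slice mem (some b) none))
        | none => st.1).items) := by
  obtain ⟨mx, hmx⟩ : ∃ m, PySem.List.max? (mems.map (fun m => (m.length : Int)))
      (fun x => x) = some m := by
    cases h : PySem.List.max? (mems.map (fun m => (m.length : Int))) (fun x => x) with
    | none =>
      rw [PySem.List.max?_eq_none_iff] at h
      exact absurd (List.map_eq_nil_iff.mp h) hne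
    | some m => exact ⟨m, rfl⟩
  dsimp only
  set longest := (PySem.List.max? (mems.map (fun m => (m.length : Int)))
    (fun x => x)).getD 0 with hlg
  have hlongeq : longest = mx := by rw [hlg, hmx]; rfl
  have hlong0 : 0 ≤ longest := by
    obtain ⟨mem, _, hfm⟩ := List.mem_map.mp (PySem.List.max?_mem hmx)
    rw [hlongeq, ← hfm]
    positivity
  have hmemle : ∀ mem ∈ mems, (mem.length : Int) ≤ longest := by
    intro mem hm
    rw [hlongeq]
    exact PySem.List.max?_isMax hmx _ (List.mem_map_of_mem hm)
  rcases lt_or_gt_of_ne halne with hneg | hpos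
  · -- negative align: Python's range(0, longest, align) is empty, both return {}
    have hr0 : PySem.List.pyRange 0 longest align = [] := by
      unfold PySem.List.pyRange
      rw [if_neg halne]
      rw [if_neg (by omega : ¬ (0 : Int) < align)]
      rw [if_neg (by omega : ¬ longest < 0)]
      simp
    rw [hr0]
    simp
  · have halc : align = ((align.toNat : Nat) : Int) := (Int.toNat_of_nonneg hpos.le).symm
    have hal0 : 0 < align.toNat := by omega
    set al := align.toNat with hal2
    set N : Nat := if (0 : Int) < longest
      then ((longest - 0 + align - 1) / align).toNat else 0 with hN
    have hrange : PySem.List.pyRange 0 longest align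
        = (List.range N).map (fun k => ((al * k : Nat) : Int)) := by
      rw [PySem.List.pyRange_of_pos 0 longest hpos, ← hN]
      apply List.map_congr_left
      intro k _
      rw [halc]
      push_cast
      ring
    rw [hrange]
    obtain ⟨h1, h2⟩ := pv_main mems addr align al halc hal0 hne N
    show (if (pvA mems addr align al N).2.2.length > 0
        then (pvA mems addr align al N).1.insert (pvA mems addr align al N).2.1
          (merge_regions (pvA mems addr align al N).2.2)
        else (pvA mems addr align al N).1).items
      = (match (pvB mems addr align al N).2 with
         | some b => (pvB mems addr align al N).1.insert (addr + b)
             (mems.map (fun mem => PySem.List.slice mem (some b) none))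
         | none => (pvB mems addr align al N).1).items
    rcases h2 with ⟨hBn, hAp, _⟩ | ⟨j, hj, hBs, hApa, hAne, _, hAmerge⟩
    · rw [hBn, hAp, h1]
      simp
    · have hlpos : (0 : Int) < longest := by
        by_contra hcon
        have hN0 : N = 0 := by rw [hN, if_neg hcon]
        omega
      have hq0 : (0 : Int) ≤ (longest - 0 + align - 1) / align :=
        Int.ediv_nonneg (by omega) hpos.le
      have hNval : (N : Int) = (longest - 0 + align - 1) / align := by
        rw [hN, if_pos hlpos]
        exact Int.toNat_of_nonneg hq0
      have hdiv := Int.ediv_add_emod (longest - 0 + align - 1) align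
      have hm0 := Int.emod_nonneg (longest - 0 + align - 1) (by omega : align ≠ 0)
      have hm1 := Int.emod_lt_of_pos (longest - 0 + align - 1) hpos
      have hlongle : longest ≤ ((al * N : Nat) : Int) := by
        have h5 : longest ≤ align * ((longest - 0 + align - 1) / align) := by linarith
        calc longest ≤ align * ((longest - 0 + align - 1) / align) := h5
          _ = ((al * N : Nat) : Int) := by rw [← hNval, halc]; push_cast; ring
      have hmemN : ∀ mem ∈ mems, mem.length ≤ al * N := by
        intro mem hm
        have hc : (mem.length : Int) ≤ ((al * N : Nat) : Int) :=
          le_trans (hmemle mem hm) hlongle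
        exact_mod_cast hc
      have hmap : mems.map (fun mem => PySem.List.slice mem (some ((al * j : Nat) : Int))
            (some ((al * N : Nat) : Int)))
          = mems.map (fun mem => PySem.List.slice mem (some ((al * j : Nat) : Int)) none) := by
        apply List.map_congr_left
        intro mem hm
        exact pv_slice_to_end mem (al * j) (al * N) (hmemN mem hm)
      rw [hBs, if_pos (List.length_pos_iff.mpr hAne : (pvA mems addr align al N).2.2.length > 0),
        hApa, hAmerge, hmap, h1]

-- ===== VERDICT (by name: the statement is the Claim_ definition above) =====
theorem diff_memory_spec : Claim_equal_diff_memory := by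
  intro mems addr align _ hpre
  exact pv_final mems addr align hpre.1 hpre.2
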